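-- pv_equiv track=rewrite | github.com/AnarielSurbito/univer | aois/lab8/func.py | search_max
-- ===== SOURCE A (Python) =====
-- def search_max(array):
--     ans = []
--     add = [1 for _ in range(len(array))]
--     for x in range(len(array[0])):
--         val = 0
--         for y in range(len(array)):
--             if array[y][x] ==  1 and add[y] == 1:
--                 val = 1
--                 break
--         for y in range(len(array)):
--             if val == 1:
--                 if array[y][x] != 1:  add[y] = 0
--         for y in range(len(array)):
--             if val == 1 and add[y] == 1:
--                 ans.append(1)
--                 break
--             if val == 0 and add[y] == 1:
--                 ans.append(0)
--                 break
--     return ans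
-- ===== SOURCE B (Python) =====
-- def search_max(array):
--     m = len(array[0])
--     norm = [[1 if row[x] == 1 else 0 for x in range(m)] for row in array]
--     return list(max(norm))
-- ===== Notes on version B (the rewrite author's own statement) =====
-- stated objective: simpler
-- what changed: B replaces A's column-by-column candidate-elimination (active-row mask updated by three inner scans per column) with a direct computation: normalize each row to 0/1 bits and return the lexicographically maximum row via Python's built-in max on lists.
import Mathlib
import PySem

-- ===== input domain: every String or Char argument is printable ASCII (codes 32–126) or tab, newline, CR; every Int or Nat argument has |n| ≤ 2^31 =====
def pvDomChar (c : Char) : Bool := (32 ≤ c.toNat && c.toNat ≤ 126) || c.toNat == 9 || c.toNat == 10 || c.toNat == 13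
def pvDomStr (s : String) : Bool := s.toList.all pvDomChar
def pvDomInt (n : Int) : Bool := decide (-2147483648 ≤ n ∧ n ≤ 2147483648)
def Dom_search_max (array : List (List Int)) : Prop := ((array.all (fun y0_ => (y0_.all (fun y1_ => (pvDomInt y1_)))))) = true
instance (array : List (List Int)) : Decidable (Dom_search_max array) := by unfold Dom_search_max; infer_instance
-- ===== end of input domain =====

-- B replaces A's per-column candidate-elimination (active-row mask, three inner scans per column)
-- by normalizing each row to 0/1 bits and returning the lexicographically maximum row (simpler code).

-- ===== PORT A =====
-- first inner loop of A: break at the first still-active row with a 1 in column x (val = 1), else val = 0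
def pvA_break1 (array : List (List Int)) (add : List Int) (x : Int) : List Int → Int
  | [] => 0
  | y :: ys =>
    if PySem.List.pyGetD (PySem.List.pyGetD array y []) x 0 = 1 ∧ PySem.List.pyGetD add y 0 = 1 then 1
    else pvA_break1 array add x ys

-- third inner loop of A: append val at the first active row, then break
def pvA_break3 (val : Int) (add : List Int) (ans : List Int) : List Int → List Int
  | [] => ans
  | y :: ys =>
    if val = 1 ∧ PySem.List.pyGetD add y 0 = 1 then ans ++ [1]
    else if val = 0 ∧ PySem.List.pyGetD add y 0 = 1 then ans ++ [0]
    else pvA_break3 val add ans ys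

def search_max (array : List (List Int)) : List Int :=
  let n : Int := array.length
  let add0 : List Int := (PySem.List.pyRange 0 n).map (fun _ => 1)
  let st := (PySem.List.pyRange 0 ((PySem.List.pyGetD array 0 []).length : Int)).foldl
    (fun (st : List Int × List Int) x =>
      let val := pvA_break1 array st.2 x (PySem.List.pyRange 0 n)
      let add := (PySem.List.pyRange 0 n).foldl
        (fun add y =>
          if val = 1 ∧ PySem.List.pyGetD (PySem.List.pyGetD array y []) x 0 ≠ 1
          then add.set y.toNat 0 else add) st.2
      let ans := pvA_break3 val add st.1 (PySem.List.pyRange 0 n)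
      (ans, add))
    ([], add0)
  st.1

-- ===== PORT B =====
def search_max_alt (array : List (List Int)) : List Int :=
  let m : Int := ((PySem.List.pyGetD array 0 []).length : Int)
  let norm := array.map (fun row =>
    (PySem.List.pyRange 0 m).map (fun x => if PySem.List.pyGetD row x 0 = 1 then (1 : Int) else 0))
  (PySem.List.max? norm id).getD []

-- ===== PRECONDITION & SPEC =====
-- Pre_ excludes exactly the inputs on which the Python A raises IndexError: an empty matrix
-- (array[0]) or a row shorter than row 0 (array[y][x]); Python B raises on the same inputs.
def Pre_search_max (array : List (List Int)) : Prop :=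
  array ≠ [] ∧ ∀ row ∈ array, array.headI.length ≤ row.length
instance (array : List (List Int)) : Decidable (Pre_search_max array) := by
  unfold Pre_search_max; infer_instance
def pvWitness_search_max : List (List Int) := [[1, 0, 2], [0, 1, 1]]
def Spec_search_max (array : List (List Int)) (out : List Int) : Prop := out = search_max_alt array
instance (array : List (List Int)) (out : List Int) : Decidable (Spec_search_max array out) := by
  unfold Spec_search_max; infer_instance

-- ===== CLAIM (what is proved, stated in full; the proofs are below) =====
def Claim_equal_search_max : Prop := ∀ (array : List (List Int)), Dom_search_max array → Pre_search_max array → Spec_search_max array (search_max array)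

-- ===== LEMMAS AND PROOFS =====

-- normalized bit of row y at column x (Nat indices; out-of-range reads give bit 0)
def pvBit (array : List (List Int)) (y x : Nat) : Int :=
  if (array.getD y []).getD x 0 = 1 then 1 else 0

-- normalized prefix of row y over the first x columns
def pvPre (array : List (List Int)) (y x : Nat) : List Int :=
  (List.range x).map (pvBit array y)

-- A's per-column loop body with a Nat column index
def pvBody (array : List (List Int)) (st : List Int × List Int) (x : Nat) : List Int × List Int :=
  let n : Int := array.length
  let val := pvA_break1 array st.2 (x : Int) (PySem.List.pyRange 0 n)
  let add := (PySem.List.pyRange 0 n).foldl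
    (fun add y =>
      if val = 1 ∧ PySem.List.pyGetD (PySem.List.pyGetD array y []) (x : Int) 0 ≠ 1
      then add.set y.toNat 0 else add) st.2
  let ans := pvA_break3 val add st.1 (PySem.List.pyRange 0 n)
  (ans, add)

-- invariant of A's column loop after processing the first x columns: ans = shared prefix of the
-- active rows, active rows realize ans, eliminated rows are lexicographically below it
def pvInv (array : List (List Int)) (x : Nat) (st : List Int × List Int) : Prop :=
  st.2.length = array.length ∧
  (∃ y < array.length, st.2.getD y 0 = 1) ∧
  (∀ y < array.length, st.2.getD y 0 = 1 ∨ st.2.getD y 0 = 0) ∧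
  (∀ y < array.length, st.2.getD y 0 = 1 → pvPre array y x = st.1) ∧
  (∀ y < array.length, st.2.getD y 0 = 0 → pvPre array y x < st.1)

lemma pv_lex_append {a b : List Int} (c d : List Int) (hl : a.length = b.length) (h : a < b) :
    a ++ c < b ++ d := by
  induction a generalizing b with
  | nil =>
    cases b
    · exact absurd h (lt_irrefl _)
    · simp at hl
  | cons x a ih =>
    cases b with
    | nil => simp at hl
    | cons y b =>
      rw [List.cons_lt_cons_iff] at h
      rcases h with h | ⟨h1, h2⟩
      · exact (List.cons_lt_cons_iff).2 (Or.inl h)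
      · exact (List.cons_lt_cons_iff).2 (Or.inr ⟨h1, ih (by simpa using hl) h2⟩)

lemma pv_lex_snoc {u v : Int} (a : List Int) (h : u < v) : a ++ [u] < a ++ [v] := by
  induction a with
  | nil => simp [List.cons_lt_cons_iff, h]
  | cons c a ih => exact (List.cons_lt_cons_iff).2 (Or.inr ⟨rfl, ih⟩)

lemma pv_if_or (p q : Prop) [Decidable p] [Decidable q] :
    (if p then (1 : Int) else if q then 1 else 0) = if p ∨ q then 1 else 0 := by
  split_ifs <;> tauto

lemma pv_bit_iff (array : List (List Int)) (y x : Nat) :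
    pvBit array y x = 1 ↔ (array.getD y []).getD x 0 = 1 := by
  unfold pvBit; split_ifs with h
  · exact iff_of_true rfl h
  · exact iff_of_false (by norm_num) h

lemma pv_bit_cases (array : List (List Int)) (y x : Nat) :
    pvBit array y x = 1 ∨ pvBit array y x = 0 := by
  unfold pvBit; split_ifs <;> simp

lemma pv_break1_eq (array : List (List Int)) (add : List Int) (x : Nat) (ys : List Nat) :
    pvA_break1 array add (x : Int) (ys.map (fun (k : Nat) => (k : Int))) =
      if ∃ y ∈ ys, pvBit array y x = 1 ∧ add.getD y 0 = 1 then 1 else 0 := by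
  induction ys with
  | nil => simp [pvA_break1]
  | cons y ys ih =>
    rw [List.map_cons, pvA_break1, ih]
    have hb : ((array.getD y []).getD x 0 = 1 ∧ add.getD y 0 = 1) ↔
        (pvBit array y x = 1 ∧ add.getD y 0 = 1) :=
      and_congr_left' (pv_bit_iff array y x).symm
    simp only [PySem.List.pyGetD_natCast]
    rw [if_congr hb rfl rfl, pv_if_or]
    simp

lemma pv_set_getD (add : List Int) (y i : Nat) :
    (add.set y (0 : Int)).getD i 0 = if i = y then 0 else add.getD i 0 := by
  by_cases hy : y < add.length
  · by_cases h : i = y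
    · subst h; simp [List.getD, hy]
    · simp [List.getD, h, Ne.symm h]
  · rw [List.set_eq_of_length_le (by omega)]
    by_cases h : i = y
    · subst h
      simp [List.getD_eq_getElem?_getD, List.getElem?_eq_none (by omega : add.length ≤ i)]
    · simp [h]

lemma pv_elim_eq (array : List (List Int)) (x : Nat) (val : Int) (ys : List Nat)
    (add : List Int) :
    ((ys.map (fun (k : Nat) => (k : Int))).foldl
      (fun add y =>
        if val = 1 ∧ PySem.List.pyGetD (PySem.List.pyGetD array y []) (x : Int) 0 ≠ 1
        then add.set y.toNat 0 else add) add).length = add.length ∧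
    ∀ i : Nat, ((ys.map (fun (k : Nat) => (k : Int))).foldl
      (fun add y =>
        if val = 1 ∧ PySem.List.pyGetD (PySem.List.pyGetD array y []) (x : Int) 0 ≠ 1
        then add.set y.toNat 0 else add) add).getD i 0 =
      if i ∈ ys ∧ val = 1 ∧ pvBit array i x ≠ 1 then 0 else add.getD i 0 := by
  induction ys generalizing add with
  | nil => refine ⟨rfl, fun i => ?_⟩; simp
  | cons y ys ih =>
    simp only [List.map_cons, List.foldl_cons]
    set add' := if val = 1 ∧ PySem.List.pyGetD (PySem.List.pyGetD array (y : Int) []) (x : Int) 0 ≠ 1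
      then add.set (y : Int).toNat 0 else add with hadd'
    have hlen' : add'.length = add.length := by
      rw [hadd']; split_ifs <;> simp
    obtain ⟨ihl, ihg⟩ := ih add'
    refine ⟨by rw [ihl, hlen'], fun i => ?_⟩
    rw [ihg i]
    have hcell : PySem.List.pyGetD (PySem.List.pyGetD array (y : Int) []) (x : Int) 0 =
        (array.getD y []).getD x 0 := by
      simp [PySem.List.pyGetD_natCast]
    have hbit : (pvBit array y x ≠ 1) ↔ ((array.getD y []).getD x 0 ≠ 1) :=
      not_congr (pv_bit_iff array y x)
    by_cases hmem : i ∈ ys ∧ val = 1 ∧ pvBit array i x ≠ 1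
    · rw [if_pos hmem, if_pos ⟨List.mem_cons_of_mem _ hmem.1, hmem.2⟩]
    · rw [if_neg hmem, hadd']
      by_cases hc : val = 1 ∧ PySem.List.pyGetD (PySem.List.pyGetD array (y : Int) []) (x : Int) 0 ≠ 1
      · rw [if_pos hc]
        by_cases hd : i ∈ y :: ys ∧ val = 1 ∧ pvBit array i x ≠ 1
        · rw [if_pos hd, Int.toNat_natCast, pv_set_getD]
          rcases hd with ⟨hiy, hval, hbit'⟩
          rcases List.mem_cons.1 hiy with rfl | hin
          · simp
          · exact absurd ⟨hin, hval, hbit'⟩ hmem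
        · rw [if_neg hd, Int.toNat_natCast, pv_set_getD, if_neg]
          rintro rfl
          rw [hcell] at hc
          exact hd ⟨List.mem_cons_self, hc.1, hbit.2 hc.2⟩
      · rw [if_neg hc]
        by_cases hd : i ∈ y :: ys ∧ val = 1 ∧ pvBit array i x ≠ 1
        · exfalso
          rcases hd with ⟨hiy, hval, hbit'⟩
          rcases List.mem_cons.1 hiy with rfl | hin
          · exact hc ⟨hval, by rw [hcell]; exact hbit.1 hbit'⟩
          · exact hmem ⟨hin, hval, hbit'⟩
        · rw [if_neg hd]

lemma pv_break3_eq (val : Int) (add ans : List Int) (ys : List Nat)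
    (hval : val = 0 ∨ val = 1) (hex : ∃ y ∈ ys, add.getD y 0 = 1) :
    pvA_break3 val add ans (ys.map (fun (k : Nat) => (k : Int))) = ans ++ [val] := by
  induction ys with
  | nil => exact absurd hex (by simp)
  | cons y ys ih =>
    rw [List.map_cons, pvA_break3]
    simp only [PySem.List.pyGetD_natCast]
    by_cases hy : add.getD y 0 = 1
    · rcases hval with rfl | rfl
      · rw [if_neg (by simp), if_pos ⟨rfl, hy⟩]
      · rw [if_pos ⟨rfl, hy⟩]
    · rw [if_neg (fun h => hy h.2), if_neg (fun h => hy h.2)]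
      apply ih
      rcases hex with ⟨z, hz, hz1⟩
      rcases List.mem_cons.1 hz with rfl | hz'
      · exact absurd hz1 hy
      · exact ⟨z, hz', hz1⟩

lemma pvPre_succ (array : List (List Int)) (y x : Nat) :
    pvPre array y (x + 1) = pvPre array y x ++ [pvBit array y x] := by
  simp [pvPre, List.range_succ]

lemma pvPre_length (array : List (List Int)) (y x : Nat) : (pvPre array y x).length = x := by
  simp [pvPre]

lemma pv_step (array : List (List Int)) (x : Nat) (st : List Int × List Int)
    (hinv : pvInv array x st) : pvInv array (x + 1) (pvBody array st x) := by
  obtain ⟨hlen, ⟨y₀, hy₀n, hy₀⟩, hdich, hact, hinact⟩ := hinv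
  have hlen1 : st.1.length = x := by rw [← hact y₀ hy₀n hy₀, pvPre_length]
  have hrange : PySem.List.pyRange 0 ((array.length : Nat) : Int) =
      (List.range array.length).map (fun (k : Nat) => (k : Int)) :=
    PySem.List.pyRange_zero_natCast _
  unfold pvBody
  simp only [hrange]
  rw [pv_break1_eq]
  set val := if ∃ y ∈ List.range array.length, pvBit array y x = 1 ∧ st.2.getD y 0 = 1
    then (1 : Int) else 0 with hvaldef
  have hval01 : val = 0 ∨ val = 1 := by
    rw [hvaldef]; split_ifs <;> simp
  obtain ⟨helimlen, helimget⟩ := pv_elim_eq array x val (List.range array.length) st.2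
  set add' := ((List.range array.length).map (fun (k : Nat) => (k : Int))).foldl
    (fun add y =>
      if val = 1 ∧ PySem.List.pyGetD (PySem.List.pyGetD array y []) (x : Int) 0 ≠ 1
      then add.set y.toNat 0 else add) st.2 with hadd'
  have hval0bits : val = 0 → ∀ y < array.length, st.2.getD y 0 = 1 → pvBit array y x = 0 := by
    intro hv0 y hyn hy1
    rcases pv_bit_cases array y x with hb | hb
    · exfalso
      have : val = 1 := by
        rw [hvaldef, if_pos ⟨y, List.mem_range.2 hyn, hb, hy1⟩]
      rw [hv0] at this; norm_num at this
    · exact hb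
  have hwitness : ∃ y < array.length, add'.getD y 0 = 1 := by
    rcases hval01 with hv0 | hv1
    · refine ⟨y₀, hy₀n, ?_⟩
      rw [helimget y₀, if_neg (by rw [hv0]; rintro ⟨-, h, -⟩; norm_num at h)]
      exact hy₀
    · have hex : ∃ y ∈ List.range array.length, pvBit array y x = 1 ∧ st.2.getD y 0 = 1 := by
        by_contra hc
        rw [hvaldef, if_neg hc] at hv1
        norm_num at hv1
      rcases hex with ⟨y₁, hy₁m, hb₁, ha₁⟩
      refine ⟨y₁, List.mem_range.1 hy₁m, ?_⟩
      rw [helimget y₁, if_neg (by rintro ⟨-, -, h⟩; exact h hb₁)]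
      exact ha₁
  have hans : pvA_break3 val add' st.1 ((List.range array.length).map (fun (k : Nat) => (k : Int))) =
      st.1 ++ [val] := by
    apply pv_break3_eq _ _ _ _ hval01
    rcases hwitness with ⟨y, hyn, hy⟩
    exact ⟨y, List.mem_range.2 hyn, hy⟩
  rw [hans]
  refine ⟨by rw [helimlen, hlen], hwitness, ?_, ?_, ?_⟩
  · intro y hy
    rw [helimget y]
    split_ifs with h
    · exact Or.inr rfl
    · exact hdich y hy
  · -- rows active after elimination carry bit val in column x and extend ans by val
    intro y hy h1
    rw [helimget y] at h1
    rw [pvPre_succ]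
    by_cases hcond : y ∈ List.range array.length ∧ val = 1 ∧ pvBit array y x ≠ 1
    · rw [if_pos hcond] at h1; norm_num at h1
    · rw [if_neg hcond] at h1
      have hpre := hact y hy h1
      have hbitval : pvBit array y x = val := by
        rcases hval01 with hv0 | hv1
        · rw [hv0]; exact hval0bits hv0 y hy h1
        · rcases pv_bit_cases array y x with hb | hb
          · rw [hb, hv1]
          · exfalso; exact hcond ⟨List.mem_range.2 hy, hv1, by rw [hb]; norm_num⟩
      rw [hpre, hbitval]
  · -- rows inactive after elimination are lexicographically below the new answer
    intro y hy h0
    rw [helimget y] at h0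
    rw [pvPre_succ]
    by_cases hcond : y ∈ List.range array.length ∧ val = 1 ∧ pvBit array y x ≠ 1
    · -- eliminated in this column (or already dead): case on the previous state of row y
      rcases hdich y hy with h1 | h1
      · -- newly eliminated: shared prefix, bit 0 < val = 1
        have hpre := hact y hy h1
        have hb0 : pvBit array y x = 0 := by
          rcases pv_bit_cases array y x with hb | hb
          · exact absurd hb hcond.2.2
          · exact hb
        rw [hpre, hb0, hcond.2.1]
        exact pv_lex_snoc st.1 (by norm_num)
      · have hlt := hinact y hy h1
        exact pv_lex_append _ _ (by rw [pvPre_length, hlen1]) hlt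
    · rw [if_neg hcond] at h0
      have hlt := hinact y hy h0
      exact pv_lex_append _ _ (by rw [pvPre_length, hlen1]) hlt

lemma pv_init (array : List (List Int)) (hne : array ≠ []) :
    pvInv array 0 (([] : List Int),
      (PySem.List.pyRange 0 ((array.length : Nat) : Int)).map (fun _ => (1 : Int))) := by
  have hn : 0 < array.length := List.length_pos_iff.mpr hne
  have hre : (PySem.List.pyRange 0 ((array.length : Nat) : Int)).map (fun _ => (1 : Int)) =
      (List.range array.length).map (fun _ => (1 : Int)) := by
    rw [PySem.List.pyRange_zero_natCast, List.map_map]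
    rfl
  have hget : ∀ y < array.length,
      ((PySem.List.pyRange 0 ((array.length : Nat) : Int)).map (fun _ => (1 : Int))).getD y 0 = 1 := by
    intro y hy
    rw [hre]
    exact PySem.List.getD_map_range _ _ _ _ hy
  refine ⟨by rw [hre]; simp, ⟨0, hn, hget 0 hn⟩, fun y hy => Or.inl (hget y hy),
    fun y hy _ => rfl, fun y hy h0 => ?_⟩
  rw [hget y hy] at h0
  norm_num at h0

lemma pv_inv_foldl (array : List (List Int)) (hne : array ≠ []) (m : Nat) :
    pvInv array m ((List.range m).foldl (pvBody array)
      (([] : List Int), (PySem.List.pyRange 0 ((array.length : Nat) : Int)).map (fun _ => (1 : Int)))) := by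
  induction m with
  | zero => simpa using pv_init array hne
  | succ m ih =>
    rw [List.range_succ, List.foldl_append, List.foldl_cons, List.foldl_nil]
    exact pv_step array m _ ih

lemma pv_foldl_some (f : Option (List Int) → List Int → Option (List Int))
    (hf : ∀ m x, ∃ v, f (some m) x = some v) :
    ∀ (l : List (List Int)) (m : List Int), ∃ v, l.foldl f (some m) = some v := by
  intro l
  induction l with
  | nil => exact fun m => ⟨m, rfl⟩
  | cons b l ih =>
    intro m
    obtain ⟨v, hv⟩ := hf m b
    rw [List.foldl_cons, hv]
    exact ih v

lemma pv_foldl_max (f : Option (List Int) → List Int → Option (List Int))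
    (hf : ∀ m x, f (some m) x = if m < x then some x else some m) :
    ∀ (l : List (List Int)) (m v : List Int), l.foldl f (some m) = some v →
      m ≤ v ∧ ∀ a ∈ l, a ≤ v := by
  intro l
  induction l with
  | nil =>
    intro m v h
    rw [List.foldl_nil] at h
    injection h with h
    exact ⟨le_of_eq h, by simp⟩
  | cons b l ih =>
    intro m v h
    rw [List.foldl_cons, hf] at h
    by_cases hmb : m < b
    · rw [if_pos hmb] at h
      obtain ⟨h1, h2⟩ := ih b v h
      refine ⟨le_of_lt (lt_of_lt_of_le hmb h1), fun a ha => ?_⟩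
      rcases List.mem_cons.1 ha with rfl | ha
      · exact h1
      · exact h2 a ha
    · rw [if_neg hmb] at h
      obtain ⟨h1, h2⟩ := ih m v h
      refine ⟨h1, fun a ha => ?_⟩
      rcases List.mem_cons.1 ha with rfl | ha
      · exact le_trans (le_of_not_gt hmb) h1
      · exact h2 a ha

lemma pv_max?_isMax (xs : List (List Int)) (v : List Int)
    (hv : PySem.List.max? xs id = some v) : ∀ a ∈ xs, a ≤ v := by
  cases xs with
  | nil => exact absurd hv (by unfold PySem.List.max?; simp)
  | cons a l =>
    unfold PySem.List.max? at hv
    rw [List.foldl_cons] at hv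
    have hv' : l.foldl _ (some a) = some v := hv
    obtain ⟨h1, h2⟩ := pv_foldl_max _ (fun m x => rfl) l a v hv'
    intro z hz
    rcases List.mem_cons.1 hz with rfl | hz
    · exact h1
    · exact h2 z hz

lemma pv_max?_some (xs : List (List Int)) (h : xs ≠ []) : ∃ v, PySem.List.max? xs id = some v := by
  cases xs with
  | nil => exact absurd rfl h
  | cons a l =>
    unfold PySem.List.max?
    rw [List.foldl_cons]
    show ∃ v, l.foldl _ (some a) = some v
    exact pv_foldl_some _ (fun m x => by dsimp only; split_ifs <;> exact ⟨_, rfl⟩) l a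

lemma pv_map_eq_range (f : List Int → List Int) (xs : List (List Int)) (d : List Int) :
    xs.map f = (List.range xs.length).map (fun i => f (xs.getD i d)) := by
  apply List.ext_getElem (by simp)
  intro i h1 h2
  simp at h1
  simp [List.getD_eq_getElem?_getD, h1]

-- ===== VERDICT (by name: the statement is the Claim_ definition above) =====
theorem search_max_spec : Claim_equal_search_max := by
  intro array _hdom hpre
  obtain ⟨hne, _hrect⟩ := hpre
  unfold Spec_search_max
  have hA : search_max array =
      ((List.range (PySem.List.pyGetD array 0 []).length).foldl (pvBody array)
        (([] : List Int),
          (PySem.List.pyRange 0 ((array.length : Nat) : Int)).map (fun _ => (1 : Int)))).1 := by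
    simp only [search_max]
    rw [PySem.List.pyRange_zero_natCast ((PySem.List.pyGetD array 0 []).length), List.foldl_map]
    rfl
  set m := (PySem.List.pyGetD array 0 []).length with hm
  obtain ⟨hlen, ⟨ya, hyan, hya⟩, hdich, hact, hinact⟩ := pv_inv_foldl array hne m
  set stf := (List.range m).foldl (pvBody array)
    (([] : List Int), (PySem.List.pyRange 0 ((array.length : Nat) : Int)).map (fun _ => (1 : Int)))
    with hstf
  have hnorm : array.map (fun row =>
        (PySem.List.pyRange 0 (m : Int)).map (fun x => if PySem.List.pyGetD row x 0 = 1 then (1 : Int) else 0)) =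
      (List.range array.length).map (fun y => pvPre array y m) := by
    rw [pv_map_eq_range _ _ []]
    apply List.map_congr_left
    intro i _
    rw [PySem.List.pyRange_zero_natCast, List.map_map]
    apply List.map_congr_left
    intro x _
    simp only [Function.comp, PySem.List.pyGetD_natCast]
    rfl
  have hB : search_max_alt array =
      (PySem.List.max? ((List.range array.length).map (fun y => pvPre array y m)) id).getD [] := by
    simp only [search_max_alt]
    rw [← hm, hnorm]
  have hnormne : (List.range array.length).map (fun y => pvPre array y m) ≠ [] := by
    have hn : 0 < array.length := List.length_pos_iff.mpr hne
    simp only [ne_eq, List.map_eq_nil_iff, List.range_eq_nil]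
    omega
  obtain ⟨v, hv⟩ := pv_max?_some _ hnormne
  have hvmem : v ∈ (List.range array.length).map (fun y => pvPre array y m) :=
    PySem.List.max?_mem hv
  have hansmem : stf.1 ∈ (List.range array.length).map (fun y => pvPre array y m) := by
    rw [List.mem_map]
    exact ⟨ya, List.mem_range.2 hyan, hact ya hyan hya⟩
  have h2 : stf.1 ≤ v := pv_max?_isMax _ v hv stf.1 hansmem
  have h1 : v ≤ stf.1 := by
    rw [List.mem_map] at hvmem
    obtain ⟨y, hym, rfl⟩ := hvmem
    have hyn := List.mem_range.1 hym
    rcases hdich y hyn with ha | ha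
    · rw [hact y hyn ha]
    · exact le_of_lt (hinact y hyn ha)
  rw [hA, hB, hv]
  show stf.1 = v
  exact le_antisymm h2 h1
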